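-- pv_equiv track=rewrite | github.com/MrBrantCode/unitest_baseline | mut_generate/mist_train_cf/cf_45901/solution.py | is_sum_prime
-- ===== SOURCE A (Python) =====
-- def is_sum_prime(n):
--     def is_prime(x):
--         if x < 2:
--             return False
--         for i in range(2, int(x**0.5) + 1):
--             if x % i == 0:
--                 return False
--         return True
--
--     primes = [i for i in range(2, n) if is_prime(i)]
--     length = len(primes)
--     for i in range(length):
--         for j in range(i + 1, length):
--             for k in range(j + 1, length):
--                 for l in range(k + 1, length):
--                     for m in range(l + 1, length):
--                         if primes[i] + primes[j] + primes[k] + primes[l] + primes[m] == n: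
--                             return True
--     return False
-- ===== SOURCE B (Python) =====
-- def is_sum_prime(n):
--     def is_prime(x):
--         if x < 2:
--             return False
--         for i in range(2, int(x**0.5) + 1):
--             if x % i == 0:
--                 return False
--         return True
--
--     if n < 2:
--         return False
--     primes = [i for i in range(2, n) if is_prime(i)]
--     # bitset subset-sum DP: bit s of bc is set iff s is the sum of c distinct primes (s <= n)
--     mask = (1 << (n + 1)) - 1
--     b0, b1, b2, b3, b4, b5 = 1, 0, 0, 0, 0, 0
--     for p in primes:
--         b5 |= (b4 << p) & mask
--         b4 |= (b3 << p) & mask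
--         b3 |= (b2 << p) & mask
--         b2 |= (b1 << p) & mask
--         b1 |= (b0 << p) & mask
--         if (b5 >> n) & 1:
--             return True
--     return False
-- ===== Notes on version B (the rewrite author's own statement) =====
-- stated objective: alternative
-- what changed: Replaces the five nested loops over prime combinations (worst case O(p^5)) with a bitset subset-sum dynamic program over the primes that tracks, for each count 0..5, the set of reachable sums up to n as bits of an integer (worst case O(p*n*5/64) word operations).
import Mathlib
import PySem

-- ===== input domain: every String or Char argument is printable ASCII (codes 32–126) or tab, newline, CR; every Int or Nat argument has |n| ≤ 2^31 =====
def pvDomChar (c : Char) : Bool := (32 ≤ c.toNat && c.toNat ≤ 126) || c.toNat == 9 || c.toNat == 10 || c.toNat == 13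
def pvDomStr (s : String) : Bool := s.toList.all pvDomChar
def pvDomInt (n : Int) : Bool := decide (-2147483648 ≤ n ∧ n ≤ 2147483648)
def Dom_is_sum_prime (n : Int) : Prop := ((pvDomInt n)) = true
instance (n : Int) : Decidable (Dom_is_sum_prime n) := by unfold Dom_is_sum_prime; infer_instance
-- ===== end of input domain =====

-- B replaces A's five nested combination loops by a bitset subset-sum DP over the primes
-- (bit s of bc set iff s is a sum of c distinct primes, s ≤ n); same return value, different algorithm.


-- ===== PORT A =====
-- shared helper: Python's nested `is_prime` (textually identical in A and in B);
-- `int(x**0.5)` is modeled by Nat.sqrt, exact on the |x| ≤ 2^31 domain (x < 2 handled first).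
def pvIsPrime (x : Int) : Bool :=
  if x < 2 then false
  else !((PySem.List.pyRange 2 ((x.toNat.sqrt : Int) + 1) 1).any (fun i => PySem.Int.mod x i == 0))

-- five nested `for` loops whose only effect is an early `return True` = nested `any`s;
-- primes[i] is pyGetD (every index the loops produce is in range).
def is_sum_prime (n : Int) : Bool :=
  let primes := (PySem.List.pyRange 2 n 1).filter (fun i => pvIsPrime i)
  let length : Int := primes.length
  (PySem.List.pyRange 0 length 1).any (fun i =>
    (PySem.List.pyRange (i+1) length 1).any (fun j =>
      (PySem.List.pyRange (j+1) length 1).any (fun k =>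
        (PySem.List.pyRange (k+1) length 1).any (fun l =>
          (PySem.List.pyRange (l+1) length 1).any (fun m =>
            PySem.List.pyGetD primes i 0 + PySem.List.pyGetD primes j 0 +
              PySem.List.pyGetD primes k 0 + PySem.List.pyGetD primes l 0 +
              PySem.List.pyGetD primes m 0 == n)))))

-- ===== PORT B =====
-- one pass of B's `for p in primes` loop over the six bitset accumulators (b0..b5);
-- the Python shift `bc << p` is by a positive prime, hence Nat-encoded via p.toNat.
def pvDpStep (mask : Nat) (st : Nat × Nat × Nat × Nat × Nat × Nat) (p : Int) :
    Nat × Nat × Nat × Nat × Nat × Nat :=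
  let b5 := st.2.2.2.2.2 ||| ((st.2.2.2.2.1 <<< p.toNat) &&& mask)
  let b4 := st.2.2.2.2.1 ||| ((st.2.2.2.1 <<< p.toNat) &&& mask)
  let b3 := st.2.2.2.1 ||| ((st.2.2.1 <<< p.toNat) &&& mask)
  let b2 := st.2.2.1 ||| ((st.2.1 <<< p.toNat) &&& mask)
  let b1 := st.2.1 ||| ((st.1 <<< p.toNat) &&& mask)
  (st.1, b1, b2, b3, b4, b5)

-- B's `for p in primes` loop with its early `return True` once bit n of b5 appears
def pvDpLoop (mask nn : Nat) : List Int → (Nat × Nat × Nat × Nat × Nat × Nat) → Bool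
  | [], _ => false
  | p :: rest, st =>
    let st' := pvDpStep mask st p
    if ((st'.2.2.2.2.2 >>> nn) &&& 1) == 1 then true
    else pvDpLoop mask nn rest st'

def is_sum_prime_alt (n : Int) : Bool :=
  if n < 2 then false
  else
    let primes := (PySem.List.pyRange 2 n 1).filter (fun i => pvIsPrime i)
    let mask : Nat := (1 <<< (n + 1).toNat) - 1
    pvDpLoop mask n.toNat primes (1, 0, 0, 0, 0, 0)

-- ===== PRECONDITION & SPEC =====
def Spec_is_sum_prime (n : Int) (out : Bool) : Prop := out = is_sum_prime_alt n
instance (n : Int) (out : Bool) : Decidable (Spec_is_sum_prime n out) := by unfold Spec_is_sum_prime; infer_instance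

-- ===== CLAIM (what is proved, stated in full; the proofs are below) =====
def Claim_equal_is_sum_prime : Prop := ∀ (n : Int), Dom_is_sum_prime n → Spec_is_sum_prime n (is_sum_prime n)

-- ===== LEMMAS AND PROOFS =====

-- "pick k of the remaining primes, running sum acc": recursive reformulation of A's loops
def pvPick (tgt : Int) : Nat → Int → List Int → Bool
  | 0, acc, _ => acc == tgt
  | _+1, _, [] => false
  | k+1, acc, x :: rest => pvPick tgt k (acc + x) rest || pvPick tgt (k+1) acc rest

-- A's k-deep nested `any` over index ranges with lower bound lo and running sum acc
def pvNest (xs : List Int) (tgt : Int) : Nat → Int → Int → Bool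
  | 0, _, acc => acc == tgt
  | k+1, lo, acc => (PySem.List.pyRange lo (xs.length : Int) 1).any
      (fun t => pvNest xs tgt k (t+1) (acc + PySem.List.pyGetD xs t 0))

theorem pvNest_eq_pick (xs : List Int) (tgt : Int) :
    ∀ (d k : Nat) (lo acc : Int), 0 ≤ lo → xs.length - lo.toNat ≤ d →
      pvNest xs tgt k lo acc = pvPick tgt k acc (xs.drop lo.toNat) := by
  intro d
  induction d with
  | zero =>
    intro k lo acc hlo hd
    have hlen : (xs.length : Int) ≤ lo := by omega
    have hdrop : xs.drop lo.toNat = [] := List.drop_eq_nil_of_le (by omega)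
    cases k with
    | zero => simp [pvNest, pvPick, hdrop]
    | succ k =>
      simp [pvNest, pvPick, hdrop, PySem.List.pyRange_one_eq_nil hlen]
  | succ d ih =>
    intro k lo acc hlo hd
    cases k with
    | zero => simp [pvNest, pvPick]
    | succ k =>
      by_cases hlen : (xs.length : Int) ≤ lo
      · have hdrop : xs.drop lo.toNat = [] := List.drop_eq_nil_of_le (by omega)
        simp [pvNest, pvPick, hdrop, PySem.List.pyRange_one_eq_nil hlen]
      · push Not at hlen
        have hlt : lo.toNat < xs.length := by omega
        have hget : PySem.List.pyGetD xs lo 0 = xs[lo.toNat] :=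
          PySem.List.pyGetD_eq_getElem xs 0 hlo (by omega)
        have hlo1 : (lo + 1).toNat = lo.toNat + 1 := by omega
        have h1 : pvNest xs tgt (k+1) lo acc
            = (pvNest xs tgt k (lo+1) (acc + xs[lo.toNat]) || pvNest xs tgt (k+1) (lo+1) acc) := by
          conv_lhs => rw [pvNest]
          rw [PySem.List.pyRange_one_cons hlen, List.any_cons, hget]
          rfl
        rw [h1, ih k (lo+1) (acc + xs[lo.toNat]) (by omega) (by omega),
            ih (k+1) (lo+1) acc (by omega) (by omega),
            List.drop_eq_getElem_cons hlt, hlo1, pvPick]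

theorem pvPick_iff (tgt : Int) :
    ∀ (xs : List Int) (k : Nat) (acc : Int),
      pvPick tgt k acc xs = true ↔
        ∃ t : List Int, t.Sublist xs ∧ t.length = k ∧ acc + t.sum = tgt := by
  intro xs
  induction xs with
  | nil =>
    intro k acc
    cases k with
    | zero => simp [pvPick, List.sublist_nil]
    | succ k => simp [pvPick, List.sublist_nil]
  | cons x rest ih =>
    intro k acc
    cases k with
    | zero =>
      simp [pvPick, List.length_eq_zero_iff]
    | succ k =>
      rw [pvPick]
      simp only [Bool.or_eq_true, ih]
      constructor
      · rintro (⟨t, hs, hl, hsum⟩ | ⟨t, hs, hl, hsum⟩)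
        · exact ⟨x :: t, List.cons_sublist_cons.mpr hs, by simp [hl], by simp; omega⟩
        · exact ⟨t, hs.trans (List.sublist_cons_self x rest), hl, hsum⟩
      · rintro ⟨t, hs, hl, hsum⟩
        rcases List.sublist_cons_iff.mp hs with h | ⟨r, rfl, hr⟩
        · exact Or.inr ⟨t, h, hl, hsum⟩
        · exact Or.inl ⟨r, hr, by simpa using hl, by simp at hsum ⊢; omega⟩

theorem is_sum_prime_eq_pick (n : Int) :
    is_sum_prime n = pvPick n 5 0 ((PySem.List.pyRange 2 n 1).filter (fun i => pvIsPrime i)) := by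
  have h : is_sum_prime n
      = pvNest ((PySem.List.pyRange 2 n 1).filter (fun i => pvIsPrime i)) n 5 0 0 := by
    simp only [is_sum_prime, pvNest, zero_add]
  rw [h, pvNest_eq_pick _ n ((PySem.List.pyRange 2 n 1).filter (fun i => pvIsPrime i)).length 5 0 0
      le_rfl (by simp)]
  simp

-- accessor for the six DP accumulators
def pvB (st : Nat × Nat × Nat × Nat × Nat × Nat) : Nat → Nat
  | 0 => st.1
  | 1 => st.2.1
  | 2 => st.2.2.1
  | 3 => st.2.2.2.1
  | 4 => st.2.2.2.2.1
  | _ => st.2.2.2.2.2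

theorem pvB_step (mask : Nat) (st : Nat × Nat × Nat × Nat × Nat × Nat) (p : Int) :
    ∀ c : Nat, 1 ≤ c → c ≤ 5 →
      pvB (pvDpStep mask st p) c = pvB st c ||| ((pvB st (c-1) <<< p.toNat) &&& mask) := by
  intro c h1 h5
  interval_cases c <;> rfl

theorem pvTestBit_one (s : Nat) : (1 : Nat).testBit s = decide (s = 0) := by
  have := Nat.testBit_two_pow (n := 0) (m := s)
  simpa [eq_comm] using this

theorem pvTestBit_step (a b k K s : Nat) :
    (a ||| ((b <<< k) &&& ((1 <<< K) - 1))).testBit s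
      = (a.testBit s || (decide (k ≤ s) && b.testBit (s - k) && decide (s < K))) := by
  simp only [Nat.testBit_or, Nat.testBit_and, Nat.testBit_shiftLeft, Nat.one_shiftLeft,
    Nat.testBit_two_pow_sub_one]

-- the DP invariant: bit s of accumulator c says "s is the sum of some c-element sublist, s ≤ n"
theorem pvDp_inv (n : Int) (hn : 2 ≤ n) :
    ∀ ps : List Int, (∀ x ∈ ps, 2 ≤ x) →
      ∀ c : Nat, c ≤ 5 → ∀ s : Nat,
        ((pvB (ps.foldl (pvDpStep ((1 <<< (n+1).toNat) - 1)) (1,0,0,0,0,0)) c).testBit s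
          ↔ ∃ t : List Int, t.Sublist ps ∧ t.length = c ∧ t.sum = (s : Int) ∧ (s : Int) ≤ n) := by
  intro ps
  induction ps using List.reverseRecOn with
  | nil =>
    intro _ c hc s
    simp only [List.foldl_nil, List.sublist_nil]
    cases c with
    | zero =>
      show ((1:Nat).testBit s ↔ _)
      rw [pvTestBit_one]
      simp only [decide_eq_true_eq]
      constructor
      · rintro rfl; exact ⟨[], rfl, rfl, by simp, by push_cast; omega⟩
      · rintro ⟨t, rfl, -, hsum, -⟩; simp at hsum; omega
    | succ c =>
      have hc' : c ≤ 4 := by omega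
      have : pvB (1,0,0,0,0,0) (c+1) = 0 := by interval_cases c <;> rfl
      rw [this, Nat.zero_testBit]
      simp
  | append_singleton ps p ih =>
    intro hmem c hc s
    have hp : 2 ≤ p := hmem p (by simp)
    have hps : ∀ x ∈ ps, 2 ≤ x := fun x hx => hmem x (by simp [hx])
    rw [List.foldl_append]
    simp only [List.foldl_cons, List.foldl_nil]
    rcases Nat.eq_zero_or_pos c with rfl | hc1
    · rw [show pvB (pvDpStep ((1 <<< (n+1).toNat) - 1)
            (ps.foldl (pvDpStep ((1 <<< (n+1).toNat) - 1)) (1,0,0,0,0,0)) p) 0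
          = pvB (ps.foldl (pvDpStep ((1 <<< (n+1).toNat) - 1)) (1,0,0,0,0,0)) 0 from rfl,
          ih hps 0 (by omega) s]
      constructor
      · rintro ⟨t, ht, hl, hsum, hle⟩
        exact ⟨t, ht.trans (List.sublist_append_left ps [p]), hl, hsum, hle⟩
      · rintro ⟨t, ht, hl, hsum, hle⟩
        obtain rfl : t = [] := List.length_eq_zero_iff.mp hl
        exact ⟨[], List.nil_sublist _, rfl, hsum, hle⟩
    · rw [pvB_step, pvTestBit_step]
      · simp only [Bool.or_eq_true, Bool.and_eq_true, decide_eq_true_eq]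
        rw [ih hps c hc s, ih hps (c-1) (by omega) (s - p.toNat)]
        have hpn : ((p.toNat : Int)) = p := by omega
        constructor
        · rintro (⟨t, ht, hl, hsum, hle⟩ | ⟨⟨hk, ⟨t, ht, hl, hsum, hle⟩⟩, hsK⟩)
          · exact ⟨t, ht.trans (List.sublist_append_left ps [p]), hl, hsum, hle⟩
          · refine ⟨t ++ [p], List.Sublist.append ht (List.Sublist.refl [p]),
              by simp [hl]; omega, ?_, ?_⟩
            · simp [List.sum_append]; omega
            · omega
        · rintro ⟨t, ht, hl, hsum, hle⟩
          rw [List.sublist_append_iff] at ht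
          obtain ⟨t1, t2, rfl, ht1, ht2⟩ := ht
          rcases List.sublist_singleton.mp ht2 with rfl | rfl
          · exact Or.inl ⟨t1, ht1, by simpa using hl, by simpa using hsum, hle⟩
          · have hnn : (0:Int) ≤ t1.sum :=
              List.sum_nonneg (fun x hx => by have := hps x (ht1.subset hx); omega)
            simp only [List.sum_append, List.sum_cons, List.sum_nil, add_zero] at hsum
            simp only [List.length_append, List.length_cons, List.length_nil] at hl
            refine Or.inr ⟨⟨by omega, ⟨t1, ht1, by omega, by omega, by omega⟩⟩, by omega⟩
      · exact hc1
      · exact hc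

theorem pvShiftRead (x k : Nat) : (((x >>> k) &&& 1) == 1) = x.testBit k := by
  simp [Nat.testBit]

-- bits of b5 are only ever added, so the early exit is transparent
theorem pvMono (mask nn : Nat) :
    ∀ (ps : List Int) (st : Nat × Nat × Nat × Nat × Nat × Nat),
      (pvB st 5).testBit nn = true →
      (pvB (ps.foldl (pvDpStep mask) st) 5).testBit nn = true := by
  intro ps
  induction ps with
  | nil => intro st h; simpa using h
  | cons p rest ih =>
    intro st h
    rw [List.foldl_cons]
    exact ih _ (by rw [pvB_step mask st p 5 (by omega) (by omega), Nat.testBit_or, h]; rfl)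

theorem pvDpLoop_eq (mask nn : Nat) :
    ∀ (ps : List Int) (st : Nat × Nat × Nat × Nat × Nat × Nat),
      (pvB st 5).testBit nn = false →
      pvDpLoop mask nn ps st = (pvB (ps.foldl (pvDpStep mask) st) 5).testBit nn := by
  intro ps
  induction ps with
  | nil => intro st h; simp [pvDpLoop, h]
  | cons p rest ih =>
    intro st h
    rw [pvDpLoop, List.foldl_cons]
    have hread : ((((pvDpStep mask st p).2.2.2.2.2 >>> nn) &&& 1) == 1)
        = (pvB (pvDpStep mask st p) 5).testBit nn := pvShiftRead _ _
    cases hb : (pvB (pvDpStep mask st p) 5).testBit nn with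
    | true =>
      rw [hread, hb]
      simpa using (pvMono mask nn rest _ hb).symm
    | false =>
      rw [hread, hb]
      simpa using ih _ hb

theorem pvFinal (n : Int) : is_sum_prime n = is_sum_prime_alt n := by
  rw [is_sum_prime_eq_pick]
  by_cases h2 : n < 2
  · have hp : PySem.List.pyRange 2 n 1 = [] := PySem.List.pyRange_one_eq_nil (by omega)
    simp [is_sum_prime_alt, h2, hp, pvPick]
  · push Not at h2
    rw [is_sum_prime_alt, if_neg (by omega)]
    show _ = pvDpLoop ((1 <<< (n + 1).toNat) - 1) n.toNat
        ((PySem.List.pyRange 2 n 1).filter (fun i => pvIsPrime i)) (1, 0, 0, 0, 0, 0)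
    rw [pvDpLoop_eq _ _ _ _ (by rw [show pvB (1,0,0,0,0,0) 5 = 0 from rfl, Nat.zero_testBit]),
        Bool.eq_iff_iff]
    have hmem : ∀ x ∈ (PySem.List.pyRange 2 n 1).filter (fun i => pvIsPrime i), 2 ≤ x := by
      intro x hx
      have := (List.mem_filter.mp hx).1
      exact (PySem.List.mem_pyRange_one.mp this).1
    rw [pvPick_iff, pvDp_inv n h2 _ hmem 5 (by omega) n.toNat]
    constructor
    · rintro ⟨t, ht, hl, hsum⟩
      exact ⟨t, ht, hl, by omega, by omega⟩
    · rintro ⟨t, ht, hl, hsum, hle⟩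
      exact ⟨t, ht, hl, by omega⟩

-- ===== VERDICT (by name: the statement is the Claim_ definition above) =====
theorem is_sum_prime_spec : Claim_equal_is_sum_prime := by
  intro n _
  unfold Spec_is_sum_prime
  exact pvFinal n
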